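-- pv_equiv track=rewrite | github.com/bluedrummer/python-programs | shut_the_box.py | valid_combos
-- ===== SOURCE A (Python) =====
-- def valid_combos(box, total):
--     combos = []
--     # One tile match
--     if total > 0 and total < 10:
--         if box[total-1] == True:
--             combos.append([total])
--     # Two tile match
--     for i in range(0, len(box)):
--         for j in range(i+1, len(box)):
--             if box[i] == True and box[j] == True:
--                 if i+1+j+1 == total:
--                     combos.append([i+1, j+1])
--     # Three tile match
--     for i in range(0, len(box)):
--         for j in range(i+1, len(box)):
--             for l in range(j+1, len(box)):
--                 if box[i] == True and box[j] == True and box[l] == True: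
--                     if i+j+l+3 == total:
--                         combos.append([i+1, j+1, l+1])
--     # Four tile match
--     for i in range(0, len(box)):
--         for j in range(i+1, len(box)):
--             for l in range(j+1, len(box)):
--                 for m in range(l+1, len(box)):
--                     if box[i] == True and box[j] == True and box[l] == True and box[m] == True:
--                         if i+j+l+m+4 == total:
--                             combos.append([i+1, j+1, l+1, m+1])
--     return combos
-- ===== SOURCE B (Python) =====
-- def combos_from(r, t, v, bs):
--     # all increasing lists of r enabled tile values from bs (first tile value v) summing to t
--     if r == 0:
--         return [[]] if t == 0 else []
--     if not bs:
--         return []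
--     rest = combos_from(r, t, v + 1, bs[1:])
--     if bs[0]:
--         return [[v] + c for c in combos_from(r - 1, t - v, v + 1, bs[1:])] + rest
--     return rest
--
-- def valid_combos(box, total):
--     out = []
--     if 0 < total < 10 and box[total - 1]:
--         out.append([total])
--     for r in (2, 3, 4):
--         out += combos_from(r, total, 1, box)
--     return out
-- ===== Notes on version B (the rewrite author's own statement) =====
-- stated objective: alternative
-- what changed: Replaces A's three hard-coded nested index-loop blocks by one recursive enumerator combos_from(r, t, v, bs) that walks the box once per size, branching on the head tile and decrementing the remaining target; the multi-tile sizes are driven by a single loop over r in (2,3,4).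
import Mathlib
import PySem

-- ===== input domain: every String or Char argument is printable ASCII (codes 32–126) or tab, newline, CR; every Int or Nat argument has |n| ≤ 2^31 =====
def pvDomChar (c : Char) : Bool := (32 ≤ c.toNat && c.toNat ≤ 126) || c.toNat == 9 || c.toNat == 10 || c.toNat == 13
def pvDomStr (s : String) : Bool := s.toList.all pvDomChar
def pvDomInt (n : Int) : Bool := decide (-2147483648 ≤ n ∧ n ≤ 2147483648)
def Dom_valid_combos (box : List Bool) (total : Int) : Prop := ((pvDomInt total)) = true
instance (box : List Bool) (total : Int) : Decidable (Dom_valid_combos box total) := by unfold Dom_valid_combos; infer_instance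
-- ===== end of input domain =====

-- B replaces A's three hand-written nested index-loop blocks by one recursive enumerator
-- over the box list (branch on the head tile, decrement the remaining target), driven by a
-- loop over the combo sizes 2,3,4; objective: alternative (same asymptotic cost).

-- ===== PORT A =====
def valid_combos (box : List Bool) (total : Int) : List (List Int) :=
  let combos : List (List Int) := []
  -- One tile match
  let combos :=
    if total > 0 ∧ total < 10 then
      if PySem.List.pyGet? box (total - 1) = some true then combos ++ [[total]] else combos
    else combos
  -- Two tile match
  let combos := (List.range box.length).foldl (fun acc i =>
      (List.range' (i+1) (box.length - (i+1))).foldl (fun acc j =>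
        if box.getD i false = true ∧ box.getD j false = true then
          if (i : Int) + 1 + (j : Int) + 1 = total then acc ++ [[(i : Int) + 1, (j : Int) + 1]] else acc
        else acc) acc) combos
  -- Three tile match
  let combos := (List.range box.length).foldl (fun acc i =>
      (List.range' (i+1) (box.length - (i+1))).foldl (fun acc j =>
        (List.range' (j+1) (box.length - (j+1))).foldl (fun acc l =>
          if box.getD i false = true ∧ box.getD j false = true ∧ box.getD l false = true then
            if (i : Int) + (j : Int) + (l : Int) + 3 = total then
              acc ++ [[(i : Int) + 1, (j : Int) + 1, (l : Int) + 1]] else acc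
          else acc) acc) acc) combos
  -- Four tile match
  let combos := (List.range box.length).foldl (fun acc i =>
      (List.range' (i+1) (box.length - (i+1))).foldl (fun acc j =>
        (List.range' (j+1) (box.length - (j+1))).foldl (fun acc l =>
          (List.range' (l+1) (box.length - (l+1))).foldl (fun acc m =>
            if box.getD i false = true ∧ box.getD j false = true ∧ box.getD l false = true ∧ box.getD m false = true then
              if (i : Int) + (j : Int) + (l : Int) + (m : Int) + 4 = total then
                acc ++ [[(i : Int) + 1, (j : Int) + 1, (l : Int) + 1, (m : Int) + 1]] else acc
            else acc) acc) acc) acc) combos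
  combos

-- ===== PORT B =====
-- all increasing lists of r enabled tile values from bs (first tile value v) summing to t
def pvCombosFrom (r : Nat) (t v : Int) (bs : List Bool) : List (List Int) :=
  match r, bs with
  | 0, _ => if t = 0 then [[]] else []
  | _ + 1, [] => []
  | r + 1, b :: rest =>
      let restL := pvCombosFrom (r + 1) t (v + 1) rest
      if b then (pvCombosFrom r (t - v) (v + 1) rest).map (fun c => v :: c) ++ restL else restL

def valid_combos_alt (box : List Bool) (total : Int) : List (List Int) :=
  let out : List (List Int) :=
    if 0 < total ∧ total < 10 then
      if PySem.List.pyGet? box (total - 1) = some true then [[total]] else []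
    else []
  ([2, 3, 4] : List Nat).foldl (fun acc r => acc ++ pvCombosFrom r total 1 box) out

-- ===== PRECONDITION & SPEC =====
-- Pre_ excludes exactly the inputs where A raises IndexError: 0 < total < 10 but the box has
-- fewer than total tiles, so box[total-1] is out of range.
def Pre_valid_combos (box : List Bool) (total : Int) : Prop :=
  ¬ (0 < total ∧ total < 10 ∧ (box.length : Int) < total)
instance (box : List Bool) (total : Int) : Decidable (Pre_valid_combos box total) := by
  unfold Pre_valid_combos; infer_instance

def pvWitness_valid_combos : List Bool × Int := ([true, true, true], 3)

def Spec_valid_combos (box : List Bool) (total : Int) (out : List (List Int)) : Prop :=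
  out = valid_combos_alt box total
instance (box : List Bool) (total : Int) (out : List (List Int)) : Decidable (Spec_valid_combos box total out) := by
  unfold Spec_valid_combos; infer_instance

-- ===== CLAIM (what is proved, stated in full; the proofs are below) =====
def Claim_equal_valid_combos : Prop := ∀ (box : List Bool) (total : Int), Dom_valid_combos box total → Pre_valid_combos box total → Spec_valid_combos box total (valid_combos box total)

-- ===== LEMMAS AND PROOFS =====

-- funext-friendly wrapper around PySem.List.foldl_append_eq_flatMap
theorem pv_foldl_extend {α β : Type} {l : List α} {step : List β → α → List β} {g : α → List β}
    (h : ∀ acc x, step acc x = acc ++ g x) (acc : List β) :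
    l.foldl step acc = acc ++ l.flatMap g := by
  have hs : step = fun acc x => acc ++ g x := by funext a b; exact h a b
  rw [hs, PySem.List.foldl_append_eq_flatMap]

-- index-based (flatMap) forms of A's three loop blocks, generalized over the value offset v
def pvP1 (bs : List Bool) (v t : Int) : List (List Int) :=
  (List.range bs.length).flatMap (fun i =>
    if bs.getD i false = true then
      if (i : Int) + v = t then [[(i : Int) + v]] else []
    else [])

def pvP2 (bs : List Bool) (v t : Int) : List (List Int) :=
  (List.range bs.length).flatMap (fun i =>
    (List.range (bs.length - (i+1))).flatMap (fun d =>
      let j := i + 1 + d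
      if bs.getD i false = true ∧ bs.getD j false = true then
        if ((i : Int) + v) + ((j : Int) + v) = t then [[(i : Int) + v, (j : Int) + v]] else []
      else []))

def pvP3 (bs : List Bool) (v t : Int) : List (List Int) :=
  (List.range bs.length).flatMap (fun i =>
    (List.range (bs.length - (i+1))).flatMap (fun d =>
      let j := i + 1 + d
      (List.range (bs.length - (j+1))).flatMap (fun e =>
        let l := j + 1 + e
        if bs.getD i false = true ∧ bs.getD j false = true ∧ bs.getD l false = true then
          if ((i : Int) + v) + ((j : Int) + v) + ((l : Int) + v) = t then
            [[(i : Int) + v, (j : Int) + v, (l : Int) + v]] else []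
        else [])))

def pvP4 (bs : List Bool) (v t : Int) : List (List Int) :=
  (List.range bs.length).flatMap (fun i =>
    (List.range (bs.length - (i+1))).flatMap (fun d =>
      let j := i + 1 + d
      (List.range (bs.length - (j+1))).flatMap (fun e =>
        let l := j + 1 + e
        (List.range (bs.length - (l+1))).flatMap (fun f =>
          let m := l + 1 + f
          if bs.getD i false = true ∧ bs.getD j false = true ∧ bs.getD l false = true ∧ bs.getD m false = true then
            if ((i : Int) + v) + ((j : Int) + v) + ((l : Int) + v) + ((m : Int) + v) = t then
              [[(i : Int) + v, (j : Int) + v, (l : Int) + v, (m : Int) + v]] else []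
          else []))))

theorem pv_flatMap_range_succ {α : Type} (n : Nat) (f : Nat → List α) :
    (List.range (n+1)).flatMap f = f 0 ++ (List.range n).flatMap (fun i => f (i+1)) := by
  rw [List.range_succ_eq_map]; simp only [List.flatMap_cons, List.flatMap_map]

theorem pvP1_eq (bs : List Bool) (v t : Int) : pvP1 bs v t = pvCombosFrom 1 t v bs := by
  induction bs generalizing v t with
  | nil => simp [pvP1, pvCombosFrom]
  | cons b bs ih =>
    unfold pvP1
    rw [List.length_cons, pv_flatMap_range_succ]
    have htail : (List.range bs.length).flatMap (fun i =>
        if (b :: bs).getD (i+1) false = true then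
          if ((i+1 : Nat) : Int) + v = t then [[((i+1 : Nat) : Int) + v]] else [] else [])
        = pvP1 bs (v+1) t := by
      unfold pvP1
      refine List.flatMap_congr fun i hi => ?_
      simp only [List.getD_cons_succ]
      push_cast
      ring_nf
    rw [htail, ih]
    show _ = pvCombosFrom 1 t v (b :: bs)
    simp only [pvCombosFrom, List.getD_cons_zero, Nat.cast_zero, zero_add]
    cases b with
    | false => simp
    | true => simp only [if_true]; split_ifs <;> simp_all <;> omega

theorem pvP2_cons (b : Bool) (bs : List Bool) (v t : Int) :
    pvP2 (b :: bs) v t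
      = (if b then (pvP1 bs (v+1) (t - v)).map (fun c => v :: c) else []) ++ pvP2 bs (v+1) t := by
  unfold pvP2 pvP1
  simp only [List.length_cons]
  rw [pv_flatMap_range_succ]
  congr 1
  · cases b with
    | false => simp
    | true =>
      rw [List.map_flatMap, show bs.length + 1 - (0+1) = bs.length from rfl]
      refine List.flatMap_congr fun d hd => ?_
      rw [show 0+1+d = d+1 from by omega]
      simp only [List.getD_eq_getElem?_getD, List.getElem?_cons_zero, List.getElem?_cons_succ,
        Option.getD_some, Nat.cast_zero, Nat.cast_add, Nat.cast_one, zero_add, true_and]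
      by_cases hg : bs[d]?.getD false = true
      · simp only [hg, if_true]
        split_ifs with h1 h2
        · simp; omega
        · omega
        · omega
        · simp
      · simp [hg]
  · refine List.flatMap_congr fun i hi => ?_
    rw [show bs.length + 1 - (i+1+1) = bs.length - (i+1) from by omega]
    refine List.flatMap_congr fun d hd => ?_
    rw [show i+1+1+d = (i+1+d)+1 from by omega]
    simp only [List.getD_cons_succ]
    push_cast
    ring_nf

theorem pvP2_eq (bs : List Bool) (v t : Int) : pvP2 bs v t = pvCombosFrom 2 t v bs := by
  induction bs generalizing v t with
  | nil => simp [pvP2, pvCombosFrom]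
  | cons b bs ih =>
    rw [pvP2_cons, ih, pvP1_eq]
    cases b <;> simp [pvCombosFrom]

theorem pvP3_cons (b : Bool) (bs : List Bool) (v t : Int) :
    pvP3 (b :: bs) v t
      = (if b then (pvP2 bs (v+1) (t - v)).map (fun c => v :: c) else []) ++ pvP3 bs (v+1) t := by
  unfold pvP3 pvP2
  simp only [List.length_cons]
  rw [pv_flatMap_range_succ]
  congr 1
  · cases b with
    | false => simp
    | true =>
      rw [List.map_flatMap, show bs.length + 1 - (0+1) = bs.length from rfl]
      refine List.flatMap_congr fun d hd => ?_
      rw [List.map_flatMap, show bs.length + 1 - (0+1+d+1) = bs.length - (d+1) from by omega]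
      refine List.flatMap_congr fun e he => ?_
      rw [show 0+1+d = d+1 from by omega, show d+1+1+e = (d+1+e)+1 from by omega]
      simp only [List.getD_eq_getElem?_getD, List.getElem?_cons_zero, List.getElem?_cons_succ,
        Option.getD_some, Nat.cast_zero, Nat.cast_add, Nat.cast_one, zero_add, true_and]
      by_cases hg : (bs[d]?.getD false = true ∧ bs[d+1+e]?.getD false = true)
      · rw [if_pos hg, if_pos hg]
        split_ifs with h1 h2 <;> first | (simp; omega) | simp
      · rw [if_neg hg, if_neg hg]; simp
  · refine List.flatMap_congr fun i hi => ?_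
    rw [show bs.length + 1 - (i+1+1) = bs.length - (i+1) from by omega]
    refine List.flatMap_congr fun d hd => ?_
    rw [show i+1+1+d = (i+1+d)+1 from by omega,
        show bs.length + 1 - ((i+1+d)+1+1) = bs.length - ((i+1+d)+1) from by omega]
    refine List.flatMap_congr fun e he => ?_
    rw [show (i+1+d)+1+1+e = ((i+1+d)+1+e)+1 from by omega]
    simp only [List.getD_cons_succ]
    push_cast
    ring_nf

theorem pvP3_eq (bs : List Bool) (v t : Int) : pvP3 bs v t = pvCombosFrom 3 t v bs := by
  induction bs generalizing v t with
  | nil => simp [pvP3, pvCombosFrom]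
  | cons b bs ih =>
    rw [pvP3_cons, ih, pvP2_eq]
    cases b <;> simp [pvCombosFrom]

theorem pvP4_cons (b : Bool) (bs : List Bool) (v t : Int) :
    pvP4 (b :: bs) v t
      = (if b then (pvP3 bs (v+1) (t - v)).map (fun c => v :: c) else []) ++ pvP4 bs (v+1) t := by
  unfold pvP4 pvP3
  simp only [List.length_cons]
  rw [pv_flatMap_range_succ]
  congr 1
  · cases b with
    | false => simp
    | true =>
      rw [List.map_flatMap, show bs.length + 1 - (0+1) = bs.length from rfl]
      refine List.flatMap_congr fun d hd => ?_
      rw [List.map_flatMap, show bs.length + 1 - (0+1+d+1) = bs.length - (d+1) from by omega]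
      refine List.flatMap_congr fun e he => ?_
      rw [List.map_flatMap, show bs.length + 1 - (0+1+d+1+e+1) = bs.length - (d+1+e+1) from by omega]
      refine List.flatMap_congr fun f hf => ?_
      rw [show 0+1+d = d+1 from by omega, show d+1+1+e = (d+1+e)+1 from by omega,
          show (d+1+e)+1+1+f = (d+1+e+1+f)+1 from by omega]
      simp only [List.getD_eq_getElem?_getD, List.getElem?_cons_zero, List.getElem?_cons_succ,
        Option.getD_some, Nat.cast_zero, Nat.cast_add, Nat.cast_one, zero_add, true_and]
      by_cases hg : (bs[d]?.getD false = true ∧ bs[d+1+e]?.getD false = true ∧ bs[d+1+e+1+f]?.getD false = true)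
      · rw [if_pos hg, if_pos hg]
        split_ifs with h1 h2 <;> first | (simp; omega) | simp
      · rw [if_neg hg, if_neg hg]; simp
  · refine List.flatMap_congr fun i hi => ?_
    rw [show bs.length + 1 - (i+1+1) = bs.length - (i+1) from by omega]
    refine List.flatMap_congr fun d hd => ?_
    rw [show i+1+1+d = (i+1+d)+1 from by omega,
        show bs.length + 1 - ((i+1+d)+1+1) = bs.length - ((i+1+d)+1) from by omega]
    refine List.flatMap_congr fun e he => ?_
    rw [show (i+1+d)+1+1+e = ((i+1+d)+1+e)+1 from by omega,
        show bs.length + 1 - (((i+1+d)+1+e)+1+1) = bs.length - (((i+1+d)+1+e)+1) from by omega]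
    refine List.flatMap_congr fun f hf => ?_
    rw [show ((i+1+d)+1+e)+1+1+f = (((i+1+d)+1+e)+1+f)+1 from by omega]
    simp only [List.getD_cons_succ]
    push_cast
    ring_nf

theorem pvP4_eq (bs : List Bool) (v t : Int) : pvP4 bs v t = pvCombosFrom 4 t v bs := by
  induction bs generalizing v t with
  | nil => simp [pvP4, pvCombosFrom]
  | cons b bs ih =>
    rw [pvP4_cons, ih, pvP3_eq]
    cases b <;> simp [pvCombosFrom]

-- ===== VERDICT (by name: the statement is the Claim_ definition above) =====
theorem pvA2 (box : List Bool) (total : Int) (acc : List (List Int)) :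
    (List.range box.length).foldl (fun acc i =>
        (List.range' (i+1) (box.length - (i+1))).foldl (fun acc j =>
          if box.getD i false = true ∧ box.getD j false = true then
            if (i : Int) + 1 + (j : Int) + 1 = total then acc ++ [[(i : Int) + 1, (j : Int) + 1]] else acc
          else acc) acc) acc
      = acc ++ pvP2 box 1 total := by
  refine Eq.trans (pv_foldl_extend (g := fun i => (List.range' (i+1) (box.length - (i+1))).flatMap (fun j =>
      if box.getD i false = true ∧ box.getD j false = true then
        if (i : Int) + 1 + (j : Int) + 1 = total then [[(i : Int) + 1, (j : Int) + 1]] else []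
      else [])) ?_ acc) ?_
  · intro acc i
    refine pv_foldl_extend ?_ acc
    intro acc j
    split_ifs <;> simp
  · congr 1
    unfold pvP2
    refine List.flatMap_congr fun i hi => ?_
    rw [List.range'_eq_map_range, List.flatMap_map]
    refine List.flatMap_congr fun d hd => ?_
    push_cast
    ring_nf

theorem pvA3 (box : List Bool) (total : Int) (acc : List (List Int)) :
    (List.range box.length).foldl (fun acc i =>
        (List.range' (i+1) (box.length - (i+1))).foldl (fun acc j =>
          (List.range' (j+1) (box.length - (j+1))).foldl (fun acc l =>
            if box.getD i false = true ∧ box.getD j false = true ∧ box.getD l false = true then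
              if (i : Int) + (j : Int) + (l : Int) + 3 = total then
                acc ++ [[(i : Int) + 1, (j : Int) + 1, (l : Int) + 1]] else acc
            else acc) acc) acc) acc
      = acc ++ pvP3 box 1 total := by
  refine Eq.trans (pv_foldl_extend (g := fun i => (List.range' (i+1) (box.length - (i+1))).flatMap (fun j =>
      (List.range' (j+1) (box.length - (j+1))).flatMap (fun l =>
        if box.getD i false = true ∧ box.getD j false = true ∧ box.getD l false = true then
          if (i : Int) + (j : Int) + (l : Int) + 3 = total then
            [[(i : Int) + 1, (j : Int) + 1, (l : Int) + 1]] else []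
        else []))) ?_ acc) ?_
  · intro acc i
    refine pv_foldl_extend (g := fun j => (List.range' (j+1) (box.length - (j+1))).flatMap (fun l =>
        if box.getD i false = true ∧ box.getD j false = true ∧ box.getD l false = true then
          if (i : Int) + (j : Int) + (l : Int) + 3 = total then
            [[(i : Int) + 1, (j : Int) + 1, (l : Int) + 1]] else []
        else [])) ?_ acc
    intro acc j
    refine pv_foldl_extend ?_ acc
    intro acc l
    split_ifs <;> simp
  · congr 1
    unfold pvP3
    refine List.flatMap_congr fun i hi => ?_
    rw [List.range'_eq_map_range, List.flatMap_map]
    refine List.flatMap_congr fun d hd => ?_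
    rw [List.range'_eq_map_range, List.flatMap_map]
    refine List.flatMap_congr fun e he => ?_
    push_cast
    ring_nf

theorem pvA4 (box : List Bool) (total : Int) (acc : List (List Int)) :
    (List.range box.length).foldl (fun acc i =>
        (List.range' (i+1) (box.length - (i+1))).foldl (fun acc j =>
          (List.range' (j+1) (box.length - (j+1))).foldl (fun acc l =>
            (List.range' (l+1) (box.length - (l+1))).foldl (fun acc m =>
              if box.getD i false = true ∧ box.getD j false = true ∧ box.getD l false = true ∧ box.getD m false = true then
                if (i : Int) + (j : Int) + (l : Int) + (m : Int) + 4 = total then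
                  acc ++ [[(i : Int) + 1, (j : Int) + 1, (l : Int) + 1, (m : Int) + 1]] else acc
              else acc) acc) acc) acc) acc
      = acc ++ pvP4 box 1 total := by
  refine Eq.trans (pv_foldl_extend (g := fun i => (List.range' (i+1) (box.length - (i+1))).flatMap (fun j =>
      (List.range' (j+1) (box.length - (j+1))).flatMap (fun l =>
        (List.range' (l+1) (box.length - (l+1))).flatMap (fun m =>
          if box.getD i false = true ∧ box.getD j false = true ∧ box.getD l false = true ∧ box.getD m false = true then
            if (i : Int) + (j : Int) + (l : Int) + (m : Int) + 4 = total then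
              [[(i : Int) + 1, (j : Int) + 1, (l : Int) + 1, (m : Int) + 1]] else []
          else [])))) ?_ acc) ?_
  · intro acc i
    refine pv_foldl_extend (g := fun j => (List.range' (j+1) (box.length - (j+1))).flatMap (fun l =>
        (List.range' (l+1) (box.length - (l+1))).flatMap (fun m =>
          if box.getD i false = true ∧ box.getD j false = true ∧ box.getD l false = true ∧ box.getD m false = true then
            if (i : Int) + (j : Int) + (l : Int) + (m : Int) + 4 = total then
              [[(i : Int) + 1, (j : Int) + 1, (l : Int) + 1, (m : Int) + 1]] else []
          else []))) ?_ acc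
    intro acc j
    refine pv_foldl_extend (g := fun l => (List.range' (l+1) (box.length - (l+1))).flatMap (fun m =>
        if box.getD i false = true ∧ box.getD j false = true ∧ box.getD l false = true ∧ box.getD m false = true then
          if (i : Int) + (j : Int) + (l : Int) + (m : Int) + 4 = total then
            [[(i : Int) + 1, (j : Int) + 1, (l : Int) + 1, (m : Int) + 1]] else []
        else [])) ?_ acc
    intro acc l
    refine pv_foldl_extend ?_ acc
    intro acc m
    split_ifs <;> simp
  · congr 1
    unfold pvP4
    refine List.flatMap_congr fun i hi => ?_
    rw [List.range'_eq_map_range, List.flatMap_map]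
    refine List.flatMap_congr fun d hd => ?_
    rw [List.range'_eq_map_range, List.flatMap_map]
    refine List.flatMap_congr fun e he => ?_
    rw [List.range'_eq_map_range, List.flatMap_map]
    refine List.flatMap_congr fun f hf => ?_
    push_cast
    ring_nf

theorem valid_combos_spec : Claim_equal_valid_combos := by
  intro box total _ _
  unfold Spec_valid_combos
  show valid_combos box total = valid_combos_alt box total
  simp only [valid_combos, valid_combos_alt]
  rw [pvA2, pvA3, pvA4, pvP2_eq, pvP3_eq, pvP4_eq]
  simp only [List.foldl, gt_iff_lt, List.nil_append, List.append_assoc]
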